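-- pv_equiv track=rewrite | github.com/4ffy/aoc2024 | 05/aoc2024d05.py | verify_pages
-- ===== SOURCE A (Python) =====
-- def verify_pages(pages, rule):
--     subrule = rule
--     for x in pages:
--         try:
--             subrule = subrule[subrule.index(x):]
--         except ValueError:
--             return False
--     return True
-- ===== SOURCE B (Python) =====
-- def verify_pages(pages, rule):
--     # Index rule once: value -> ascending list of positions where it occurs.
--     occ = {}
--     for i, v in enumerate(rule):
--         occ.setdefault(v, []).append(i)
--     p = 0
--     for x in pages:
--         lst = occ.get(x)
--         if lst is None:
--             return False
--         # binary search: first position in lst holding an index >= p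
--         lo, hi = 0, len(lst)
--         while lo < hi:
--             mid = (lo + hi) // 2
--             if lst[mid] < p:
--                 lo = mid + 1
--             else:
--                 hi = mid
--         if lo == len(lst):
--             return False
--         p = lst[lo]
--     return True
-- ===== Notes on version B (the rewrite author's own statement) =====
-- stated objective: faster
-- what changed: Instead of repeatedly scanning the remaining suffix of rule with list.index and reslicing, B precomputes a dict mapping each value to its sorted occurrence indices and advances a single pointer by binary-searching each page's occurrence list for the first index >= the pointer.
import Mathlib
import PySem

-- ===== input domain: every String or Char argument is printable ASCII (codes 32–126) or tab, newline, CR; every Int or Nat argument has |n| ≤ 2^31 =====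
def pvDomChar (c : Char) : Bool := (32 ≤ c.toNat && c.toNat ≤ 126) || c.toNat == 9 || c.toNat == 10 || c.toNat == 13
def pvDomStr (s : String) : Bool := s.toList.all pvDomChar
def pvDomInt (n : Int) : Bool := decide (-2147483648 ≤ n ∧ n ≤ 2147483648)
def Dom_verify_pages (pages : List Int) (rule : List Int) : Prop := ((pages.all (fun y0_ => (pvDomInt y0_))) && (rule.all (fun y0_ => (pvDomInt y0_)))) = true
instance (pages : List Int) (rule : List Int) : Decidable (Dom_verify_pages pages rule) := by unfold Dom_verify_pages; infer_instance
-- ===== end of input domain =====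

-- B replaces A's repeated list.index scans over ever-shorter suffixes of rule by a
-- one-time occurrence index (value -> sorted positions) plus a pointer advanced by
-- binary search; objective: faster (asymptotic).

-- ===== PORT A =====
def vpLoopA (pages : List Int) (subrule : List Int) : Bool :=
  match pages with
  | [] => true
  | x :: rest =>
    match PySem.List.index? subrule x with
    | none => false
    | some i => vpLoopA rest (PySem.List.slice subrule (some (i : Int)) none)

def verify_pages (pages : List Int) (rule : List Int) : Bool :=
  vpLoopA pages rule

-- ===== PORT B =====
-- occ = {}; for i, v in enumerate(rule): occ.setdefault(v, []).append(i)
def vpBuildOcc (rule : List Int) : PySem.Dict Int (List Int) :=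
  (PySem.List.enumerate rule 0).foldl (fun d q => d.modify q.2 [] (· ++ [q.1])) PySem.Dict.empty

-- while lo < hi: mid = (lo+hi)//2; if lst[mid] < p: lo = mid+1 else: hi = mid
def vpBisect (lst : List Int) (p : Int) (lo hi : Int) : Int :=
  if h : lo < hi then
    let mid := PySem.Int.floordiv (lo + hi) 2
    if PySem.List.pyGetD lst mid 0 < p then vpBisect lst p (mid + 1) hi
    else vpBisect lst p lo mid
  else lo
termination_by (hi - lo).toNat
decreasing_by
  · have h1 := PySem.Int.le_floordiv_iff_mul_le (a := lo + hi) (b := 2) (q := lo) (by omega)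
    omega
  · have h2 := PySem.Int.floordiv_lt_iff_lt_mul (a := lo + hi) (b := 2) (q := hi) (by omega)
    omega

def vpLoopB (pages : List Int) (occ : PySem.Dict Int (List Int)) (p : Int) : Bool :=
  match pages with
  | [] => true
  | x :: rest =>
    match occ.get? x with
    | none => false
    | some lst =>
      let lo := vpBisect lst p 0 (lst.length : Int)
      if lo = (lst.length : Int) then false
      else vpLoopB rest occ (PySem.List.pyGetD lst lo 0)

def verify_pages_alt (pages : List Int) (rule : List Int) : Bool :=
  vpLoopB pages (vpBuildOcc rule) 0

-- ===== PRECONDITION & SPEC =====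
def Spec_verify_pages (pages : List Int) (rule : List Int) (out : Bool) : Prop := out = verify_pages_alt pages rule
instance (pages : List Int) (rule : List Int) (out : Bool) : Decidable (Spec_verify_pages pages rule out) := by unfold Spec_verify_pages; infer_instance

-- ===== CLAIM (what is proved, stated in full; the proofs are below) =====
def Claim_equal_verify_pages : Prop := ∀ (pages : List Int) (rule : List Int), Dom_verify_pages pages rule → Spec_verify_pages pages rule (verify_pages pages rule)

-- ===== LEMMAS AND PROOFS =====

-- the occurrence list B's dict stores for v: indices (offset s) of the occurrences of v
def vpIdx (rule : List Int) (s v : Int) : List Int :=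
  ((PySem.List.enumerate rule s).filter (fun q => q.2 == v)).map (·.1)

theorem vpIdx_mem (rule : List Int) (s v j : Int) :
    j ∈ vpIdx rule s v ↔ ∃ k : Nat, ∃ hk : k < rule.length, rule[k] = v ∧ j = s + k := by
  induction rule generalizing s with
  | nil => simp [vpIdx, PySem.List.enumerate_nil]
  | cons a as ih =>
    simp only [vpIdx, PySem.List.enumerate_cons, List.filter_cons]
    by_cases hav : a = v
    · subst hav
      simp only [beq_self_eq_true, if_true, List.map_cons, List.mem_cons]
      rw [show ((PySem.List.enumerate as (s+1)).filter (fun q => q.2 == a)).map (·.1)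
            = vpIdx as (s+1) a from rfl, ih]
      constructor
      · rintro (rfl | ⟨k, hk, hv, rfl⟩)
        · exact ⟨0, by simp, by simp, by simp⟩
        · exact ⟨k + 1, by simpa using Nat.succ_lt_succ hk, by simpa using hv, by push_cast; ring⟩
      · rintro ⟨k, hk, hv, rfl⟩
        cases k with
        | zero => left; simp
        | succ k =>
          right
          exact ⟨k, by simpa using Nat.lt_of_succ_lt_succ hk, by simpa using hv, by push_cast; ring⟩
    · simp only [beq_iff_eq, hav, if_false]
      rw [show ((PySem.List.enumerate as (s+1)).filter (fun q => q.2 == v)).map (·.1)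
            = vpIdx as (s+1) v from rfl, ih]
      constructor
      · rintro ⟨k, hk, hv, rfl⟩
        exact ⟨k + 1, by simpa using Nat.succ_lt_succ hk, by simpa using hv, by push_cast; ring⟩
      · rintro ⟨k, hk, hv, rfl⟩
        cases k with
        | zero => exact absurd (by simpa using hv) hav
        | succ k =>
          exact ⟨k, by simpa using Nat.lt_of_succ_lt_succ hk, by simpa using hv, by push_cast; ring⟩

theorem vpIdx_lb (rule : List Int) (s v j : Int) (h : j ∈ vpIdx rule s v) : s ≤ j := by
  obtain ⟨k, hk, _, rfl⟩ := (vpIdx_mem rule s v j).1 h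
  omega

theorem vpIdx_pairwise (rule : List Int) (s v : Int) :
    (vpIdx rule s v).Pairwise (· < ·) := by
  induction rule generalizing s with
  | nil => simp [vpIdx, PySem.List.enumerate_nil]
  | cons a as ih =>
    simp only [vpIdx, PySem.List.enumerate_cons, List.filter_cons]
    by_cases hav : a = v
    · subst hav
      simp only [beq_self_eq_true, if_true, List.map_cons]
      refine List.Pairwise.cons (fun j hj => ?_) (ih (s + 1))
      have := vpIdx_lb as (s + 1) a j hj
      omega
    · simpa [hav] using ih (s + 1)

theorem vpBuildOcc_getD (rule : List Int) (v : Int) :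
    (vpBuildOcc rule).getD v [] = vpIdx rule 0 v := by
  unfold vpBuildOcc
  rw [show (List.foldl (fun d (q : Int × Int) => d.modify q.2 [] (· ++ [q.1])) PySem.Dict.empty
        (PySem.List.enumerate rule 0))
      = (List.foldl (fun d (q : Int × Int) => d.modify q.1 [] (· ++ [q.2])) PySem.Dict.empty
        ((PySem.List.enumerate rule 0).map Prod.swap)) from
        (List.foldl_map (f := Prod.swap)
          (g := fun (d : PySem.Dict Int (List Int)) (q : Int × Int) => d.modify q.1 [] (· ++ [q.2]))
          (l := PySem.List.enumerate rule 0) (init := PySem.Dict.empty)).symm]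
  rw [PySem.Dict.getD_foldl_modify_append]
  simp only [vpIdx]
  rw [List.filter_map]
  simp [Function.comp_def, List.map_map]

theorem vpBuildOcc_keys (rule : List Int) (v : Int) :
    v ∈ (vpBuildOcc rule).keys ↔ v ∈ rule := by
  unfold vpBuildOcc
  rw [PySem.Dict.keys_foldl_modify_key (PySem.List.enumerate rule 0) (fun q => q.2) []
      (fun _ q => (· ++ [q.1])) PySem.Dict.empty]
  rw [PySem.Set.mem_update]
  simp [PySem.List.map_snd_enumerate]

theorem vpBuildOcc_get? (rule : List Int) (v : Int) :
    (vpBuildOcc rule).get? v = if v ∈ rule then some (vpIdx rule 0 v) else none := by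
  by_cases hv : v ∈ rule
  · have hc : (vpBuildOcc rule).contains v = true :=
      (PySem.Dict.contains_iff_mem_keys _ _).2 ((vpBuildOcc_keys rule v).2 hv)
    have hne : (vpBuildOcc rule).get? v ≠ none := by
      rw [Ne, PySem.Dict.get?_eq_none_iff_contains]
      simp [hc]
    obtain ⟨w, hw⟩ := Option.ne_none_iff_exists'.1 hne
    have : (vpBuildOcc rule).getD v [] = w := by
      show ((vpBuildOcc rule).get? v).getD [] = w
      simp [hw]
    rw [hw, if_pos hv, ← vpBuildOcc_getD, this]
  · have hc : (vpBuildOcc rule).contains v = false := by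
      by_contra h
      exact hv ((vpBuildOcc_keys rule v).1 ((PySem.Dict.contains_iff_mem_keys _ _).1
        (by simpa using h)))
    rw [(PySem.Dict.get?_eq_none_iff_contains _ _).2 hc, if_neg hv]

theorem vpSortedMono (lst : List Int) (hs : lst.Pairwise (· ≤ ·)) (i j : Nat)
    (hi : i < lst.length) (hj : j < lst.length) (hij : i ≤ j) : lst[i] ≤ lst[j] := by
  rcases Nat.lt_or_ge i j with h | h
  · exact List.pairwise_iff_getElem.1 hs i j hi hj h
  · have : i = j := le_antisymm hij h
    subst this; exact le_rfl

theorem vpBisect_spec (lst : List Int) (p : Int) (hs : lst.Pairwise (· ≤ ·)) :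
    ∀ n : Nat, ∀ lo hi : Int, (hi - lo).toNat ≤ n → 0 ≤ lo → lo ≤ hi → hi ≤ (lst.length : Int) →
    (∀ k : Nat, ∀ hk : k < lst.length, (k : Int) < lo → lst[k] < p) →
    (∀ k : Nat, ∀ hk : k < lst.length, hi ≤ (k : Int) → p ≤ lst[k]) →
    0 ≤ vpBisect lst p lo hi ∧ vpBisect lst p lo hi ≤ (lst.length : Int) ∧
    (∀ k : Nat, ∀ hk : k < lst.length, (k : Int) < vpBisect lst p lo hi → lst[k] < p) ∧
    (∀ k : Nat, ∀ hk : k < lst.length, vpBisect lst p lo hi ≤ (k : Int) → p ≤ lst[k]) := by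
  have hmono := vpSortedMono lst hs
  intro n
  induction n with
  | zero =>
    intro lo hi hn h0 hlh hhl hpre hsuf
    have : ¬ lo < hi := by omega
    rw [vpBisect, dif_neg this]
    exact ⟨h0, by omega, hpre, fun k hk hke => hsuf k hk (by omega)⟩
  | succ n ih =>
    intro lo hi hn h0 hlh hhl hpre hsuf
    by_cases h : lo < hi
    · rw [vpBisect]
      simp only [dif_pos h]
      have hmid1 := (PySem.Int.le_floordiv_iff_mul_le (a := lo + hi) (b := 2) (q := lo) (by omega)).2 (by omega)
      have hmid2 := (PySem.Int.floordiv_lt_iff_lt_mul (a := lo + hi) (b := 2) (q := hi) (by omega)).2 (by omega)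
      set mid := PySem.Int.floordiv (lo + hi) 2 with hmiddef
      have hmnn : 0 ≤ mid := le_trans h0 hmid1
      have hmlt : mid < (lst.length : Int) := lt_of_lt_of_le hmid2 hhl
      rw [PySem.List.pyGetD_eq_getElem lst 0 hmnn hmlt]
      have hmltn : mid.toNat < lst.length := by omega
      by_cases hc : lst[mid.toNat] < p
      · rw [if_pos hc]
        exact ih (mid + 1) hi (by omega) (by omega) (by omega) hhl
          (fun k hk hke => lt_of_le_of_lt (hmono k mid.toNat hk hmltn (by omega)) hc) hsuf
      · rw [if_neg hc]
        exact ih lo mid (by omega) h0 (by omega) (by omega) hpre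
          (fun k hk hke => le_trans (not_lt.1 hc) (hmono mid.toNat k hmltn hk (by omega)))
    · rw [vpBisect, dif_neg h]
      exact ⟨h0, by omega, hpre, fun k hk hke => hsuf k hk (by omega)⟩

theorem vpIndex?_eq_some_of (xs : List Int) (v : Int) (k : Nat) (hk : k < xs.length)
    (hv : xs[k] = v) (hmin : ∀ j : Nat, ∀ hj : j < xs.length, j < k → xs[j] ≠ v) :
    PySem.List.index? xs v = some k := by
  have hmem : v ∈ xs := hv ▸ List.getElem_mem hk
  obtain ⟨k', hk'⟩ := Option.isSome_iff_exists.1 ((PySem.List.index?_isSome_iff xs v).2 hmem)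
  obtain ⟨hk'lt, hvk', hmin'⟩ := PySem.List.getElem_of_index?_eq_some hk'
  have : k' = k := by
    by_contra hne
    rcases Nat.lt_or_ge k' k with h | h
    · exact hmin k' hk'lt h hvk'
    · exact hmin' k (by omega) hv
  rw [hk', this]

theorem vpLoop_eq (pages rule : List Int) (p : Int) (hp : 0 ≤ p) :
    vpLoopA pages (rule.drop p.toNat) = vpLoopB pages (vpBuildOcc rule) p := by
  induction pages generalizing p with
  | nil => simp [vpLoopA, vpLoopB]
  | cons x rest ih =>
    rw [vpLoopA, vpLoopB]
    by_cases hx : x ∈ rule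
    · have hget : (vpBuildOcc rule).get? x = some (vpIdx rule 0 x) := by
        rw [vpBuildOcc_get?, if_pos hx]
      simp only [hget]
      set L := vpIdx rule 0 x with hL
      have hLs : L.Pairwise (· ≤ ·) := (vpIdx_pairwise rule 0 x).imp (fun h => le_of_lt h)
      have hspec := vpBisect_spec L p hLs L.length 0 (L.length : Int)
        (by omega) le_rfl (by positivity) le_rfl
        (fun k hk hke => absurd hke (by omega)) (fun k hk hke => absurd hke (by omega))
      set r := vpBisect L p 0 (L.length : Int) with hrdef
      obtain ⟨hr0, hrlen, hrpre, hrsuf⟩ := hspec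
      have hLmem : ∀ j : Int, j ∈ L ↔ ∃ k : Nat, ∃ hk : k < rule.length, rule[k] = x ∧ j = (k : Int) := by
        intro j
        rw [hL, vpIdx_mem]
        constructor
        · rintro ⟨k, hk, hv, rfl⟩; exact ⟨k, hk, hv, by omega⟩
        · rintro ⟨k, hk, hv, rfl⟩; exact ⟨k, hk, hv, by omega⟩
      by_cases hrl : r = (L.length : Int)
      · rw [if_pos hrl]
        -- all occurrences of x in rule are < p: x not in the dropped suffix
        have hnone : PySem.List.index? (rule.drop p.toNat) x = none := by
          rw [PySem.List.index?_eq_none_iff]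
          intro hmem
          obtain ⟨i, hi, hvi⟩ := List.mem_iff_getElem.1 hmem
          rw [List.getElem_drop] at hvi
          have hjL : ((p.toNat + i : Nat) : Int) ∈ L :=
            (hLmem _).2 ⟨p.toNat + i, by rw [List.length_drop] at hi; omega, hvi, rfl⟩
          obtain ⟨k, hkl, hkv⟩ := List.mem_iff_getElem.1 hjL
          have := hrpre k hkl (by omega)
          omega
        rw [hnone]
      · rw [if_neg hrl]
        have hrltn : r.toNat < L.length := by omega
        have hget2 : PySem.List.pyGetD L r 0 = L[r.toNat] :=
          PySem.List.pyGetD_eq_getElem L 0 hr0 (by omega)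
        set m := L[r.toNat] with hmdef
        have hmp : p ≤ m := hrsuf r.toNat hrltn (by omega)
        obtain ⟨km, hkm, hkmv, hkme⟩ := (hLmem m).1 (List.getElem_mem hrltn)
        -- m = km, an index of an occurrence of x, the least one ≥ p
        have hsome : PySem.List.index? (rule.drop p.toNat) x = some (km - p.toNat) := by
          have hklen : km - p.toNat < (rule.drop p.toNat).length := by
            rw [List.length_drop]; omega
          apply vpIndex?_eq_some_of (rule.drop p.toNat) x (km - p.toNat) hklen
          · rw [List.getElem_drop]
            have hE : p.toNat + (km - p.toNat) = km := by omega
            simp only [hE]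
            exact hkmv
          · intro j hj hjk hvj
            rw [List.getElem_drop] at hvj
            rw [List.length_drop] at hj
            have hjL : ((p.toNat + j : Nat) : Int) ∈ L :=
              (hLmem _).2 ⟨p.toNat + j, by omega, hvj, rfl⟩
            obtain ⟨k, hkl, hkv⟩ := List.mem_iff_getElem.1 hjL
            have hkr : ¬ ((k : Int) < r) := by
              intro hlt
              have := hrpre k hkl hlt
              omega
            have : L[r.toNat] ≤ L[k] := vpSortedMono L hLs r.toNat k hrltn hkl (by omega)
            omega
        simp only [hsome, hget2]
        have hstep : PySem.List.slice (rule.drop p.toNat) (some ((km - p.toNat : Nat) : Int)) none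
            = rule.drop m.toNat := by
          rw [PySem.List.slice_from_natCast, List.drop_drop]
          congr 1
          omega
        rw [hstep]
        exact ih m (by omega)
    · have hget : (vpBuildOcc rule).get? x = none := by
        rw [vpBuildOcc_get?, if_neg hx]
      simp only [hget]
      have : PySem.List.index? (rule.drop p.toNat) x = none := by
        rw [PySem.List.index?_eq_none_iff]
        intro hmem
        exact hx (List.mem_of_mem_drop hmem)
      rw [this]

-- ===== VERDICT (by name: the statement is the Claim_ definition above) =====
theorem verify_pages_spec : Claim_equal_verify_pages := by
  intro pages rule _
  unfold Spec_verify_pages verify_pages verify_pages_alt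
  have := vpLoop_eq pages rule 0 le_rfl
  simpa using this
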